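-- pv_equiv track=rewrite | github.com/chuc002/BoardChatAI | lib/perfect_extraction.py | _classify_amount_type
-- ===== SOURCE A (Python) =====
-- def _classify_amount_type(context: str) -> str:
--     """Classify the type of monetary amount based on context."""
--     context_lower = context.lower()
--
--     if any(word in context_lower for word in ['initiation', 'joining', 'new member']):
--         return 'initiation'
--     elif any(word in context_lower for word in ['transfer', 'transferring']):
--         return 'transfer'
--     elif any(word in context_lower for word in ['reinstatement', 'reinstating']):
--         return 'reinstatement'
--     elif any(word in context_lower for word in ['annual', 'yearly']):
--         return 'annual'
--     elif any(word in context_lower for word in ['monthly']):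
--         return 'monthly'
--     elif any(word in context_lower for word in ['quarterly']):
--         return 'quarterly'
--     elif any(word in context_lower for word in ['assessment', 'special']):
--         return 'assessment'
--     else:
--         return 'general'
-- ===== SOURCE B (Python) =====
-- _GROUPS = [
--     ('initiation', 'joining', 'new member'),
--     ('transfer', 'transferring'),
--     ('reinstatement', 'reinstating'),
--     ('annual', 'yearly'),
--     ('monthly',),
--     ('quarterly',),
--     ('assessment', 'special'),
-- ]
-- _LABELS = ['initiation', 'transfer', 'reinstatement', 'annual',
--            'monthly', 'quarterly', 'assessment', 'general']
-- _KEYWORD_PRIORITY = [(kw, p) for p, group in enumerate(_GROUPS) for kw in group]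
--
--
-- def _classify_amount_type(context: str) -> str:
--     """Classify the type of monetary amount based on context."""
--     context_lower = context.lower()
--     best = min((p for kw, p in _KEYWORD_PRIORITY if kw in context_lower),
--                default=len(_GROUPS))
--     return _LABELS[best]
-- ===== Notes on version B (the rewrite author's own statement) =====
-- stated objective: alternative
-- what changed: Replaces the short-circuiting if/elif chain with an aggregation: scan the whole flat keyword->priority list, take the minimum priority among all matching keywords (default = 'general'), and index into a label array.
import Mathlib
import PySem

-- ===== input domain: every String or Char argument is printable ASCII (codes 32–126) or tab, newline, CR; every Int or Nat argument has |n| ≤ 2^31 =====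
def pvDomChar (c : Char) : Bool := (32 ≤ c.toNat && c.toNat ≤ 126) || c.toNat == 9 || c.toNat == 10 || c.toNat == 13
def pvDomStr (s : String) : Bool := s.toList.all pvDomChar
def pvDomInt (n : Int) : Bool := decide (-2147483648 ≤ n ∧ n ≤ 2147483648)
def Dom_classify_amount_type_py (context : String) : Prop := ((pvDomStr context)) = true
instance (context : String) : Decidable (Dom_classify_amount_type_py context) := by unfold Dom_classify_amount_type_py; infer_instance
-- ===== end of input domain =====

-- B replaces the short-circuiting if/elif chain by an aggregation: take the minimum
-- priority over ALL matching keywords in a flat keyword→priority list, then index into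
-- a label array ('general' as default). Same cost; different structure (alternative).

-- ===== PORT A =====
def classify_amount_type_py (context : String) : String :=
  let context_lower := PySem.Str.lower context
  if ["initiation", "joining", "new member"].any (fun word => PySem.Str.isIn word context_lower) then "initiation"
  else if ["transfer", "transferring"].any (fun word => PySem.Str.isIn word context_lower) then "transfer"
  else if ["reinstatement", "reinstating"].any (fun word => PySem.Str.isIn word context_lower) then "reinstatement"
  else if ["annual", "yearly"].any (fun word => PySem.Str.isIn word context_lower) then "annual"
  else if ["monthly"].any (fun word => PySem.Str.isIn word context_lower) then "monthly"
  else if ["quarterly"].any (fun word => PySem.Str.isIn word context_lower) then "quarterly"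
  else if ["assessment", "special"].any (fun word => PySem.Str.isIn word context_lower) then "assessment"
  else "general"

-- ===== PORT B =====
def amountGroups : List (List String) :=
  [["initiation", "joining", "new member"],
   ["transfer", "transferring"],
   ["reinstatement", "reinstating"],
   ["annual", "yearly"],
   ["monthly"],
   ["quarterly"],
   ["assessment", "special"]]

def amountLabels : List String :=
  ["initiation", "transfer", "reinstatement", "annual", "monthly", "quarterly", "assessment", "general"]

-- _KEYWORD_PRIORITY = [(kw, p) for p, group in enumerate(_GROUPS) for kw in group]
-- (precomputed at module load; ported as its value, one (keyword, priority) pair per entry)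
def keywordPriority : List (String × Nat) :=
  [("initiation", 0), ("joining", 0), ("new member", 0),
   ("transfer", 1), ("transferring", 1),
   ("reinstatement", 2), ("reinstating", 2),
   ("annual", 3), ("yearly", 3),
   ("monthly", 4),
   ("quarterly", 5),
   ("assessment", 6), ("special", 6)]

def classify_amount_type_py_alt (context : String) : String :=
  let context_lower := PySem.Str.lower context
  -- best = min((p for kw, p in _KEYWORD_PRIORITY if kw in context_lower), default=len(_GROUPS))
  let best := ((keywordPriority.filter (fun kp => PySem.Str.isIn kp.1 context_lower)).foldl
                 (fun a kp => min a kp.2) amountGroups.length)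
  amountLabels.getD best "general"

-- ===== PRECONDITION & SPEC =====
def Spec_classify_amount_type_py (context : String) (out : String) : Prop := out = classify_amount_type_py_alt context
instance (context : String) (out : String) : Decidable (Spec_classify_amount_type_py context out) := by unfold Spec_classify_amount_type_py; infer_instance

-- ===== CLAIM (what is proved, stated in full; the proofs are below) =====
def Claim_equal_classify_amount_type_py : Prop := ∀ (context : String), Dom_classify_amount_type_py context → Spec_classify_amount_type_py context (classify_amount_type_py context)

-- ===== LEMMAS AND PROOFS =====

-- folding min over one priority-p keyword group = one conditional min step
theorem foldl_min_group (cl : String) (kws : List String) (p acc : Nat) :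
    ((kws.map (fun kw => (kw, p))).filter (fun kp => PySem.Str.isIn kp.1 cl)).foldl
        (fun a kp => min a kp.2) acc
      = if kws.any (fun w => PySem.Str.isIn w cl) then min acc p else acc := by
  induction kws generalizing acc with
  | nil => simp
  | cons k t ih =>
    cases hk : PySem.Str.isIn k cl with
    | true =>
      simp only [List.map_cons, List.filter_cons, hk, List.any_cons, Bool.true_or, if_true,
        List.foldl_cons, ih]
      split_ifs <;> omega
    | false =>
      simp only [List.map_cons, List.filter_cons, List.any_cons, hk, Bool.false_eq_true,
        if_false, Bool.false_or, ih]

-- keywordPriority is the seven keyword groups, tagged with their priorities, concatenated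
theorem keywordPriority_eq :
    keywordPriority
      = (["initiation", "joining", "new member"].map (fun kw => (kw, (0 : Nat))))
        ++ (["transfer", "transferring"].map (fun kw => (kw, (1 : Nat))))
        ++ (["reinstatement", "reinstating"].map (fun kw => (kw, (2 : Nat))))
        ++ (["annual", "yearly"].map (fun kw => (kw, (3 : Nat))))
        ++ (["monthly"].map (fun kw => (kw, (4 : Nat))))
        ++ (["quarterly"].map (fun kw => (kw, (5 : Nat))))
        ++ (["assessment", "special"].map (fun kw => (kw, (6 : Nat)))) := rfl

-- ===== VERDICT (by name: the statement is the Claim_ definition above) =====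
set_option maxHeartbeats 4000000 in
theorem classify_amount_type_py_spec : Claim_equal_classify_amount_type_py := by
  intro context _
  show classify_amount_type_py context = classify_amount_type_py_alt context
  simp only [classify_amount_type_py, classify_amount_type_py_alt, keywordPriority_eq,
    amountGroups, List.filter_append, List.foldl_append, foldl_min_group,
    List.length_cons, List.length_nil]
  generalize PySem.Str.lower context = cl
  split_ifs <;> rfl
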